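-- pv_equiv track=rewrite | github.com/AnamariaGreceanu/InstaFollowers | main.py | no_followback
-- ===== SOURCE A (Python) =====
-- def no_followback(followers,following):
--     followers.sort()
--     following.sort()
--     no_followback_list=[]
--     for i in range(len(following)):
--         try:
--             followers.index(following[i])
--         except ValueError:
--             no_followback_list+=[following[i]]
--     return no_followback_list
-- ===== SOURCE B (Python) =====
-- def no_followback(followers, following):
--     followers.sort()
--     following.sort()
--     no_followback_list = []
--     i = 0
--     j = 0
--     while i < len(following):
--         if j < len(followers) and followers[j] < following[i]:
--             j += 1
--         elif j < len(followers) and followers[j] == following[i]: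
--             i += 1
--         else:
--             no_followback_list.append(following[i])
--             i += 1
--     return no_followback_list
-- ===== Notes on version B (the rewrite author's own statement) =====
-- stated objective: faster
-- what changed: Replaces the per-element followers.index scan (a linear search inside the loop) by a single two-pointer merge pass over the two sorted lists; both versions still sort the arguments in place.
import Mathlib
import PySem

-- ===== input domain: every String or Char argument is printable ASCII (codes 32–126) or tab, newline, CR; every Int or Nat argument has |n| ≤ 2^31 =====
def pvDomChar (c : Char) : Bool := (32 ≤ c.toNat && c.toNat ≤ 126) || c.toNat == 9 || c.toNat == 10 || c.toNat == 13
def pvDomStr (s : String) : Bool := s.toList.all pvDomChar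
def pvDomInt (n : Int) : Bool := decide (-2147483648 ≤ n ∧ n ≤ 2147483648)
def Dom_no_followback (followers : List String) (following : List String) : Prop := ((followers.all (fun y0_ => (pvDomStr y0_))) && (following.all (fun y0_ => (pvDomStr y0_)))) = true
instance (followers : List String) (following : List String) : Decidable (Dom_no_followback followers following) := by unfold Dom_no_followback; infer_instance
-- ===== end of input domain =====

-- B replaces A's per-element .index scans over followers by a single two-pointer
-- merge over the two sorted lists (faster: O((n+m) log(n+m)) vs O(n·m) scanning).
-- Both A and B sort the two argument lists in place (same side effect); the
-- equivalence proved here is about the return value.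

-- ===== PORT A =====
def no_followback (followers : List String) (following : List String) : List String :=
  (PySem.List.pyRange 0 ((PySem.List.sorted following (fun x => x) false).length : Int) 1).foldl (fun acc i =>
    -- try: followers.index(...)  except ValueError: append following[i]
    match PySem.List.index? (PySem.List.sorted followers (fun x => x) false) (PySem.List.pyGetD (PySem.List.sorted following (fun x => x) false) i "") with
    | some _ => acc
    | none => acc ++ [PySem.List.pyGetD (PySem.List.sorted following (fun x => x) false) i ""]) []

-- ===== PORT B =====
-- the while loop of Source B: i walks `following`, j walks `followers`
def mergeNF : List String → List String → List String
  | _, [] => []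
  | [], g :: gs => g :: mergeNF [] gs
  | f :: fs, g :: gs =>
    if f < g then mergeNF fs (g :: gs)
    else if f = g then mergeNF (f :: fs) gs
    else g :: mergeNF (f :: fs) gs

def no_followback_alt (followers : List String) (following : List String) : List String :=
  mergeNF (PySem.List.sorted followers (fun x => x) false)
          (PySem.List.sorted following (fun x => x) false)

-- ===== PRECONDITION & SPEC =====
def Spec_no_followback (followers : List String) (following : List String) (out : List String) : Prop := out = no_followback_alt followers following
instance (followers : List String) (following : List String) (out : List String) : Decidable (Spec_no_followback followers following out) := by unfold Spec_no_followback; infer_instance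

-- ===== CLAIM (what is proved, stated in full; the proofs are below) =====
def Claim_equal_no_followback : Prop := ∀ (followers : List String) (following : List String), Dom_no_followback followers following → Spec_no_followback followers following (no_followback followers following)

-- ===== LEMMAS AND PROOFS =====

-- A's loop accumulates exactly the filter "not a member of followers'"
lemma foldlA_eq_filter (fs : List String) (gs : List String) (acc : List String) :
    gs.foldl (fun acc g =>
      match PySem.List.index? fs g with
      | some _ => acc
      | none => acc ++ [g]) acc
    = acc ++ gs.filter (fun g => ¬ g ∈ fs) := by
  induction gs generalizing acc with
  | nil => simp
  | cons g gs ih =>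
    cases h : PySem.List.index? fs g with
    | some k =>
      have hm : g ∈ fs := (PySem.List.index?_isSome_iff fs g).mp (by rw [h]; rfl)
      rw [List.foldl_cons]
      simp only [h]
      rw [ih, List.filter_cons_of_neg (by simp [hm])]
    | none =>
      have hm : g ∉ fs := (PySem.List.index?_eq_none_iff fs g).mp h
      rw [List.foldl_cons]
      simp only [h]
      rw [ih, List.filter_cons_of_pos (by simp [hm])]
      simp

-- the two-pointer merge over sorted lists computes the same filter
lemma mergeNF_eq_filter (fs gs : List String)
    (hf : fs.Pairwise (· ≤ ·)) (hg : gs.Pairwise (· ≤ ·)) :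
    mergeNF fs gs = gs.filter (fun g => ¬ g ∈ fs) := by
  induction fs, gs using mergeNF.induct with
  | case1 fs => simp [mergeNF]
  | case2 g gs ih =>
    simp only [mergeNF, ih (List.Pairwise.nil) (List.Pairwise.of_cons hg)]
    simp
  | case3 f fs g gs hlt ih =>
    rw [mergeNF, if_pos hlt, ih (List.Pairwise.of_cons hf) hg]
    refine (List.filter_congr ?_).symm
    intro x hx
    have hgx : g ≤ x := by
      rcases List.mem_cons.mp hx with h | h
      · exact le_of_eq h.symm
      · exact List.rel_of_pairwise_cons hg h
    have hne : x ≠ f := fun h => absurd (lt_of_lt_of_le hlt hgx) (by simp [h])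
    simp only [List.mem_cons, decide_not]
    simp [hne]
  | case4 fs g gs hlt ih =>
    rw [mergeNF, if_neg hlt, if_pos rfl, ih hf (List.Pairwise.of_cons hg),
      List.filter_cons_of_neg (by simp)]
  | case5 f fs g gs hlt hne ih =>
    have hgf : g < f := by
      rcases lt_trichotomy f g with h | h | h
      · exact absurd h hlt
      · exact absurd h hne
      · exact h
    have hgf' : g ≠ f := fun h => absurd hgf (by simp [h])
    have hgfs : g ∉ fs := fun hmem =>
      absurd (lt_of_lt_of_le hgf (List.rel_of_pairwise_cons hf hmem)) (lt_irrefl _)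
    rw [mergeNF, if_neg hlt, if_neg hne, ih hf (List.Pairwise.of_cons hg),
      List.filter_cons_of_pos (by simp [hgf', hgfs])]

-- ===== VERDICT (by name: the statement is the Claim_ definition above) =====
theorem no_followback_spec : Claim_equal_no_followback := by
  intro followers following _
  unfold Spec_no_followback no_followback no_followback_alt
  rw [PySem.List.foldl_pyRange_zero_pyGetD' (PySem.List.sorted following (fun x => x) false) ""
        (fun acc g =>
          match PySem.List.index? (PySem.List.sorted followers (fun x => x) false) g with
          | some _ => acc
          | none => acc ++ [g]) [],
      foldlA_eq_filter,
      mergeNF_eq_filter _ _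
        (PySem.List.sorted_pairwise followers (fun x => x))
        (PySem.List.sorted_pairwise following (fun x => x))]
  simp
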